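-- pv_equiv track=rewrite | github.com/gyl30/socks | script/sort_headers_libclang.py | fallback_extern_c_blocks
-- ===== SOURCE A (Python) =====
-- from typing import Dict, List, Optional, Set, Tuple
--
-- def fallback_extern_c_blocks(lines: List[str]) -> List[Tuple[int, int]]:
--     blocks: List[Tuple[int, int]] = []
--     i = 0
--     n = len(lines)
--     while i < n:
--         if 'extern "C"' not in lines[i]:
--             i += 1
--             continue
--         if "{" in lines[i]:
--             k = i
--         else:
--             k = i + 1
--             while k < n and lines[k].strip() == "":
--                 k += 1
--             if k >= n or "{" not in lines[k]:
--                 i += 1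
--                 continue
--         brace_depth = 0
--         end = None
--         for m in range(k, n):
--             brace_depth += lines[m].count("{")
--             brace_depth -= lines[m].count("}")
--             if brace_depth == 0:
--                 end = m + 1
--                 break
--         if end is None:
--             i += 1
--             continue
--         snippet = lines[i:end]
--         if not any("#include" in line for line in snippet):
--             i = end
--             continue
--         blocks.append((i + 1, end))
--         i = end
--     return blocks
-- ===== SOURCE B (Python) =====
-- from typing import List, Tuple
--
-- def fallback_extern_c_blocks(lines: List[str]) -> List[Tuple[int, int]]:
--     n = len(lines)
--     # prefix brace depth: pref[j] = depth after first j lines; inc[j] = #include-lines among first j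
--     pref = [0] * (n + 1)
--     inc = [0] * (n + 1)
--     for j, line in enumerate(lines):
--         pref[j + 1] = pref[j] + line.count("{") - line.count("}")
--         inc[j + 1] = inc[j] + (1 if "#include" in line else 0)
--     # match_end[k] = smallest j in (k, n] with pref[j] == pref[k], else None
--     # (= end line, exclusive, of a brace scan starting at line k)
--     match_end: List = [None] * n
--     seen = {}
--     for k in range(n - 1, -1, -1):
--         seen[pref[k + 1]] = k + 1
--         match_end[k] = seen.get(pref[k])
--     blocks: List[Tuple[int, int]] = []
--     i = 0
--     while i < n:
--         if 'extern "C"' not in lines[i]: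
--             i += 1
--             continue
--         if "{" in lines[i]:
--             k = i
--         else:
--             k = i + 1
--             while k < n and lines[k].strip() == "":
--                 k += 1
--             if k >= n or "{" not in lines[k]:
--                 i += 1
--                 continue
--         end = match_end[k]
--         if end is None:
--             i += 1
--             continue
--         if inc[end] > inc[i]:
--             blocks.append((i + 1, end))
--         i = end
--     return blocks
-- ===== Notes on version B (the rewrite author's own statement) =====
-- stated objective: faster
-- what changed: Replaces A's per-start forward brace-counting scan and per-block include re-scan with one pass that precomputes prefix brace-depth and include-count arrays plus a backward-pass dictionary giving each line its matching depth-return line, so each extern-C start is resolved by O(1) lookups.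
import Mathlib
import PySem

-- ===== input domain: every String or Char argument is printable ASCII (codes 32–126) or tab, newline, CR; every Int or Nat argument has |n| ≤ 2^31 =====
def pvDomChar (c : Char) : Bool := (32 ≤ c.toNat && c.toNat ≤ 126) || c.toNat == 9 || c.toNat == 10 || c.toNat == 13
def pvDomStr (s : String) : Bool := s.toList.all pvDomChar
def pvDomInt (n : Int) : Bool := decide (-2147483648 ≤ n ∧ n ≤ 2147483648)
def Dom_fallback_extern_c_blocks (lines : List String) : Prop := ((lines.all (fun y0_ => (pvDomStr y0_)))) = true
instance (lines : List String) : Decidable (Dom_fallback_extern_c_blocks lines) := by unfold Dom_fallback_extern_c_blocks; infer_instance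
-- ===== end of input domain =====

-- B replaces A's per-start forward brace scan and per-block include re-scan by precomputed
-- prefix-depth / include-count arrays and a backward-pass matching-line dictionary (faster).


-- ===== PORT A =====
-- helper shared by both ports: both Pythons contain the identical blank-line skip
-- and the identical "find the line with the opening brace" step.
def pvSkipBlank (lines : List String) (n k : Nat) : Nat :=
  if h : k < n ∧ PySem.Str.strip (lines.getD k "") = "" then pvSkipBlank lines n (k + 1) else k
termination_by n - k
decreasing_by omega

-- the `if "{" in lines[i]: k = i else: … continue` step; `none` = the `continue`
def pvFindOpen (lines : List String) (n i : Nat) : Option Nat :=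
  if PySem.Str.isIn "{" (lines.getD i "") then some i
  else
    let k := pvSkipBlank lines n (i + 1)
    if n ≤ k ∨ PySem.Str.isIn "{" (lines.getD k "") = false then none else some k

-- A's inner `for m in range(k, n)` brace-depth scan; returns `end` (= m+1) or none
def pvLoopA' (lines : List String) (n : Nat) (depth : Int) (m : Nat) : Option Nat :=
  if h : m < n then
    let d := depth + (PySem.Str.count (lines.getD m "") "{" : Int)
                   - (PySem.Str.count (lines.getD m "") "}" : Int)
    if d = 0 then some (m + 1) else pvLoopA' lines n d (m + 1)
  else none
termination_by n - m
decreasing_by omega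

-- the outer `while i < n` loop; i strictly increases, so fuel = n+1 suffices
def pvGoA (lines : List String) (n : Nat) : Nat → Nat → List (Int × Int)
  | 0, _ => []
  | fuel + 1, i =>
    if i < n then
      if PySem.Str.isIn "extern \"C\"" (lines.getD i "") = false then
        pvGoA lines n fuel (i + 1)
      else
        match pvFindOpen lines n i with
        | none => pvGoA lines n fuel (i + 1)
        | some k =>
          match pvLoopA' lines n 0 k with
          | none => pvGoA lines n fuel (i + 1)
          | some e =>
            let snippet := PySem.List.slice lines (some (i : Int)) (some (e : Int))
            if snippet.any (fun l => PySem.Str.isIn "#include" l) = false then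
              pvGoA lines n fuel e
            else ((i : Int) + 1, (e : Int)) :: pvGoA lines n fuel e
    else []

def fallback_extern_c_blocks (lines : List String) : List (Int × Int) :=
  pvGoA lines lines.length (lines.length + 1) 0

-- ===== PORT B =====
-- prefix array builder (the python `for j, line in enumerate(lines)` fill loop)
def pvScan (f : String → Int) (a : Int) : List String → List Int
  | [] => [a]
  | l :: ls => a :: pvScan f (a + f l) ls

def pvBraceDelta (s : String) : Int :=
  (PySem.Str.count s "{" : Int) - (PySem.Str.count s "}" : Int)

def pvIncOne (s : String) : Int := if PySem.Str.isIn "#include" s then 1 else 0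

-- backward pass: `for k in range(n-1, -1, -1): seen[pref[k+1]] = k+1; match_end[k] = seen.get(pref[k])`
def pvBuildMatch (pref : List Int) : Nat → PySem.Dict Int Nat → List (Option Nat)
  | 0, _ => []
  | k + 1, seen =>
    let seen' := seen.insert (pref.getD (k + 1) 0) (k + 1)
    pvBuildMatch pref k seen' ++ [seen'.get? (pref.getD k 0)]

def pvGoB (lines : List String) (n : Nat) (inc : List Int) (matchEnd : List (Option Nat)) :
    Nat → Nat → List (Int × Int)
  | 0, _ => []
  | fuel + 1, i =>
    if i < n then
      if PySem.Str.isIn "extern \"C\"" (lines.getD i "") = false then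
        pvGoB lines n inc matchEnd fuel (i + 1)
      else
        match pvFindOpen lines n i with
        | none => pvGoB lines n inc matchEnd fuel (i + 1)
        | some k =>
          match matchEnd.getD k none with
          | none => pvGoB lines n inc matchEnd fuel (i + 1)
          | some e =>
            if inc.getD i 0 < inc.getD e 0 then
              ((i : Int) + 1, (e : Int)) :: pvGoB lines n inc matchEnd fuel e
            else pvGoB lines n inc matchEnd fuel e
    else []

def fallback_extern_c_blocks_alt (lines : List String) : List (Int × Int) :=
  let n := lines.length
  let pref := pvScan pvBraceDelta 0 lines
  let inc := pvScan pvIncOne 0 lines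
  let matchEnd := pvBuildMatch pref n PySem.Dict.empty
  pvGoB lines n inc matchEnd (n + 1) 0

-- ===== PRECONDITION & SPEC =====
def Spec_fallback_extern_c_blocks (lines : List String) (out : List (Int × Int)) : Prop := out = fallback_extern_c_blocks_alt lines
instance (lines : List String) (out : List (Int × Int)) : Decidable (Spec_fallback_extern_c_blocks lines out) := by unfold Spec_fallback_extern_c_blocks; infer_instance

-- ===== CLAIM (what is proved, stated in full; the proofs are below) =====
def Claim_equal_fallback_extern_c_blocks : Prop := ∀ (lines : List String), Dom_fallback_extern_c_blocks lines → Spec_fallback_extern_c_blocks lines (fallback_extern_c_blocks lines)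

-- ===== LEMMAS AND PROOFS =====

-- spec-level helper: first index j ∈ [j, n] with pref[j] = v
def pvFirstEq (lines : List String) (v : Int) (j : Nat) : Option Nat :=
  if h : j ≤ lines.length then
    if (pvScan pvBraceDelta 0 lines).getD j 0 = v then some j else pvFirstEq lines v (j + 1)
  else none
termination_by lines.length + 1 - j
decreasing_by omega

lemma pvScan_succ (f : String → Int) : ∀ (ls : List String) (a : Int) (m : Nat), m < ls.length →
    (pvScan f a ls).getD (m + 1) 0 = (pvScan f a ls).getD m 0 + f (ls.getD m "") := by
  intro ls; induction ls with
  | nil => intro a m h; simp at h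
  | cons l ls ih =>
    intro a m h
    cases m with
    | zero => simp [pvScan]; cases ls <;> simp [pvScan]
    | succ m => simpa [pvScan] using ih (a + f l) m (by simpa using h)

lemma pvLoopA'_bounds (lines : List String) (n : Nat) : ∀ (K m : Nat) (d : Int) (e : Nat),
    n - m ≤ K → pvLoopA' lines n d m = some e → m < e ∧ e ≤ n := by
  intro K
  induction K with
  | zero =>
    intro m d e hK h
    rw [pvLoopA', dif_neg (by omega : ¬ m < n)] at h
    cases h
  | succ K ih =>
    intro m d e hK h
    by_cases hm : m < n
    · rw [pvLoopA', dif_pos hm] at h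
      dsimp only at h
      split_ifs at h with hd
      · cases h; omega
      · have := ih (m + 1) _ e (by omega) h
        omega
    · rw [pvLoopA', dif_neg hm] at h
      cases h

lemma pvLoopA'_eq (lines : List String) : ∀ (K m : Nat) (d : Int), lines.length - m ≤ K →
    pvLoopA' lines lines.length d m
      = pvFirstEq lines ((pvScan pvBraceDelta 0 lines).getD m 0 - d) (m + 1) := by
  intro K
  induction K with
  | zero =>
    intro m d hK
    rw [pvLoopA', dif_neg (by omega : ¬ m < lines.length)]
    rw [pvFirstEq, dif_neg (by omega : ¬ m + 1 ≤ lines.length)]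
  | succ K ih =>
    intro m d hK
    by_cases hm : m < lines.length
    · rw [pvLoopA', dif_pos hm]
      dsimp only
      rw [pvFirstEq, dif_pos (by omega : m + 1 ≤ lines.length)]
      have hsucc := pvScan_succ pvBraceDelta lines 0 m hm
      simp only [pvBraceDelta] at hsucc
      by_cases hd : d + (PySem.Str.count (lines.getD m "") "{" : Int)
                      - (PySem.Str.count (lines.getD m "") "}" : Int) = 0
      · rw [if_pos hd, if_pos (by omega)]
      · rw [if_neg hd, if_neg (by omega)]
        rw [ih (m + 1) _ (by omega)]
        congr 1
        omega
    · rw [pvLoopA', dif_neg hm]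
      rw [pvFirstEq, dif_neg (by omega : ¬ m + 1 ≤ lines.length)]

lemma pvBuildMatch_length (pref : List Int) : ∀ (k : Nat) (seen : PySem.Dict Int Nat),
    (pvBuildMatch pref k seen).length = k := by
  intro k; induction k with
  | zero => intro seen; simp [pvBuildMatch]
  | succ k ih => intro seen; simp [pvBuildMatch, ih]

lemma pvBuildMatch_spec (lines : List String) : ∀ (k : Nat) (seen : PySem.Dict Int Nat),
    k ≤ lines.length →
    (∀ v, seen.get? v = pvFirstEq lines v (k + 1)) →
    ∀ idx, idx < k →
      (pvBuildMatch (pvScan pvBraceDelta 0 lines) k seen).getD idx none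
        = pvFirstEq lines ((pvScan pvBraceDelta 0 lines).getD idx 0) (idx + 1) := by
  intro k
  induction k with
  | zero => intro seen hk hinv idx hidx; omega
  | succ k ih =>
    intro seen hk hinv idx hidx
    have hinv' : ∀ v, (seen.insert ((pvScan pvBraceDelta 0 lines).getD (k + 1) 0) (k + 1)).get? v
        = pvFirstEq lines v (k + 1) := by
      intro v
      rw [PySem.Dict.get?_insert]
      rw [pvFirstEq, dif_pos (by omega : k + 1 ≤ lines.length)]
      by_cases hv : (pvScan pvBraceDelta 0 lines).getD (k + 1) 0 = v
      · rw [if_pos hv.symm, if_pos hv]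
      · rw [if_neg (fun h => hv h.symm), if_neg hv, hinv v]
    simp only [pvBuildMatch]
    rcases Nat.lt_or_ge idx k with hlt | hge
    · rw [List.getD_append _ _ _ _ (by rw [pvBuildMatch_length]; exact hlt)]
      exact ih _ (by omega) hinv' idx hlt
    · have hidxk : idx = k := by omega
      subst hidxk
      rw [List.getD_append_right _ _ _ _ (by rw [pvBuildMatch_length])]
      rw [pvBuildMatch_length]
      simp only [Nat.sub_self, List.getD_cons_zero]
      exact hinv' _

lemma pvInc_mono (lines : List String) : ∀ (K i e : Nat), e - i ≤ K → i ≤ e → e ≤ lines.length →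
    (pvScan pvIncOne 0 lines).getD i 0 ≤ (pvScan pvIncOne 0 lines).getD e 0 := by
  intro K
  induction K with
  | zero => intro i e hK hie hen; have : i = e := by omega
            subst this; exact le_refl _
  | succ K ih =>
    intro i e hK hie hen
    rcases Nat.lt_or_ge i e with hlt | hge
    · have step := pvScan_succ pvIncOne lines 0 i (by omega)
      have h1 : (pvScan pvIncOne 0 lines).getD i 0 ≤ (pvScan pvIncOne 0 lines).getD (i + 1) 0 := by
        rw [step]
        have : (0 : Int) ≤ pvIncOne (lines.getD i "") := by
          simp only [pvIncOne]; split_ifs <;> omega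
        omega
      exact le_trans h1 (ih (i + 1) e (by omega) (by omega) hen)
    · have : i = e := by omega
      subst this; exact le_refl _

lemma pvInc_any (lines : List String) : ∀ (K i e : Nat), e - i ≤ K → i ≤ e → e ≤ lines.length →
    (((lines.drop i).take (e - i)).any (fun l => PySem.Str.isIn "#include" l))
      = decide ((pvScan pvIncOne 0 lines).getD i 0 < (pvScan pvIncOne 0 lines).getD e 0) := by
  intro K
  induction K with
  | zero =>
    intro i e hK hie hen
    have : i = e := by omega
    subst this
    simp
  | succ K ih =>
    intro i e hK hie hen
    rcases Nat.lt_or_ge i e with hlt | hge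
    · have hdrop := List.drop_eq_getElem_cons (l := lines) (by omega : i < lines.length)
      have hstep := pvScan_succ pvIncOne lines 0 i (by omega)
      have hmono := pvInc_mono lines (e - (i + 1)) (i + 1) e (by omega) (by omega) hen
      have hei : e - i = (e - (i + 1)) + 1 := by omega
      rw [hdrop, hei, List.take_succ_cons, List.any_cons]
      have hgetD : lines[i] = lines.getD i "" := (List.getD_eq_getElem lines "" (by omega)).symm
      by_cases hinc : PySem.Str.isIn "#include" (lines.getD i "") = true
      · have h1 : pvIncOne (lines.getD i "") = 1 := by unfold pvIncOne; rw [hinc]; simp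
        rw [hgetD, hinc]
        simp only [Bool.true_or]
        have hlt2 : (pvScan pvIncOne 0 lines).getD i 0 < (pvScan pvIncOne 0 lines).getD e 0 := by
          rw [h1] at hstep; omega
        exact (decide_eq_true hlt2).symm
      · rw [Bool.not_eq_true] at hinc
        have h0 : pvIncOne (lines.getD i "") = 0 := by unfold pvIncOne; rw [hinc]; simp
        rw [hgetD, hinc]
        simp only [Bool.false_or]
        rw [ih (i + 1) e (by omega) (by omega) hen]
        have : (pvScan pvIncOne 0 lines).getD (i + 1) 0 = (pvScan pvIncOne 0 lines).getD i 0 := by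
          rw [hstep, h0]; omega
        rw [this]
    · have : i = e := by omega
      subst this
      simp

lemma pvSkipBlank_le (lines : List String) (n : Nat) : ∀ (K k : Nat), n - k ≤ K → k ≤ pvSkipBlank lines n k := by
  intro K
  induction K with
  | zero =>
    intro k hK
    rw [pvSkipBlank]
    split_ifs with h
    · omega
    · exact le_refl _
  | succ K ih =>
    intro k hK
    rw [pvSkipBlank]
    split_ifs with h
    · exact le_trans (by omega) (ih (k + 1) (by omega))
    · exact le_refl _

lemma pvFindOpen_bounds (lines : List String) (n i k : Nat) (hi : i < n)
    (h : pvFindOpen lines n i = some k) : i ≤ k ∧ k < n := by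
  simp only [pvFindOpen] at h
  split_ifs at h with h1 h2
  · cases h; exact ⟨le_refl _, hi⟩
  · cases h
    have := pvSkipBlank_le lines n n (i + 1) (by omega)
    have hnk : ¬ n ≤ pvSkipBlank lines n (i + 1) := fun hnk => h2 (Or.inl hnk)
    omega

lemma pvGo_eq (lines : List String) : ∀ (fuel i : Nat),
    pvGoA lines lines.length fuel i
      = pvGoB lines lines.length (pvScan pvIncOne 0 lines)
          (pvBuildMatch (pvScan pvBraceDelta 0 lines) lines.length PySem.Dict.empty) fuel i := by
  intro fuel
  induction fuel with
  | zero => intro i; rfl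
  | succ fuel ih =>
    intro i
    by_cases hi : i < lines.length
    · rw [pvGoA, pvGoB, if_pos hi, if_pos hi]
      by_cases hext : PySem.Str.isIn "extern \"C\"" (lines.getD i "") = false
      · rw [if_pos hext, if_pos hext]; exact ih (i + 1)
      · rw [if_neg hext, if_neg hext]
        cases hk : pvFindOpen lines lines.length i with
        | none => exact ih (i + 1)
        | some k =>
          dsimp only
          obtain ⟨hik, hkn⟩ := pvFindOpen_bounds lines lines.length i k hi hk
          have hmatch : (pvBuildMatch (pvScan pvBraceDelta 0 lines) lines.length PySem.Dict.empty).getD k none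
              = pvLoopA' lines lines.length 0 k := by
            rw [pvBuildMatch_spec lines lines.length PySem.Dict.empty (le_refl _)
                  (fun v => by
                    rw [PySem.Dict.get?_empty, pvFirstEq,
                        dif_neg (by omega : ¬ lines.length + 1 ≤ lines.length)])
                  k hkn]
            rw [pvLoopA'_eq lines lines.length k 0 (by omega)]
            congr 1
            omega
          rw [hmatch]
          cases he : pvLoopA' lines lines.length 0 k with
          | none => exact ih (i + 1)
          | some e =>
            dsimp only
            obtain ⟨hke, hen⟩ := pvLoopA'_bounds lines lines.length lines.length k 0 e (by omega) he
            have hslice : PySem.List.slice lines (some (i : Int)) (some (e : Int))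
                = (lines.drop i).take (e - i) := PySem.List.slice_natCast lines i e
            have hany := pvInc_any lines (e - i) i e (by omega) (by omega) hen
            rw [hslice, hany]
            simp only [List.getD_eq_getElem?_getD]
            by_cases hc : (pvScan pvIncOne 0 lines)[i]?.getD 0 < (pvScan pvIncOne 0 lines)[e]?.getD 0
            · rw [if_neg (by simp [hc]), if_pos hc]
              exact congrArg _ (ih e)
            · rw [if_pos (by simp [hc]), if_neg hc]
              exact ih e
    · rw [pvGoA, pvGoB, if_neg hi, if_neg hi]

-- ===== VERDICT (by name: the statement is the Claim_ definition above) =====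
theorem fallback_extern_c_blocks_spec : Claim_equal_fallback_extern_c_blocks := by
  intro lines _
  unfold Spec_fallback_extern_c_blocks fallback_extern_c_blocks fallback_extern_c_blocks_alt
  exact pvGo_eq lines (lines.length + 1) 0
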